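-- pv_equiv track=rewrite | github.com/andywu42/omnimarket | scripts/generate_catalog.py | group_nodes_by_pack
-- ===== SOURCE A (Python) =====
-- from typing import Any
--
-- def group_nodes_by_pack(
--     nodes: list[dict[str, Any]],
-- ) -> dict[str, list[dict[str, Any]]]:
--     """Group node entries by their pack field. Nodes without pack go to 'uncategorized'."""
--     groups: dict[str, list[dict[str, Any]]] = {}
--     for node in nodes:
--         pack = node.get("pack", "uncategorized")
--         groups.setdefault(pack, []).append(node)
--     # Sort within each pack by node name for idempotence
--     for pack in groups:
--         groups[pack] = sorted(groups[pack], key=lambda n: n["name"])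
--     return dict(sorted(groups.items()))
-- ===== SOURCE B (Python) =====
-- def group_nodes_by_pack(nodes):
--     """Group node entries by their pack field. Nodes without pack go to 'uncategorized'."""
--     packs = sorted({n.get("pack", "uncategorized") for n in nodes})
--     return {
--         p: sorted(
--             (n for n in nodes if n.get("pack", "uncategorized") == p),
--             key=lambda n: n["name"],
--         )
--         for p in packs
--     }
-- ===== Notes on version B (the rewrite author's own statement) =====
-- stated objective: alternative
-- what changed: B sorts the distinct pack names once and builds each group directly by filtering the input and name-sorting it, instead of A's dict-of-lists accumulation via setdefault/append followed by a per-key re-sort and a final sort of the items.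
import Mathlib
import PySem

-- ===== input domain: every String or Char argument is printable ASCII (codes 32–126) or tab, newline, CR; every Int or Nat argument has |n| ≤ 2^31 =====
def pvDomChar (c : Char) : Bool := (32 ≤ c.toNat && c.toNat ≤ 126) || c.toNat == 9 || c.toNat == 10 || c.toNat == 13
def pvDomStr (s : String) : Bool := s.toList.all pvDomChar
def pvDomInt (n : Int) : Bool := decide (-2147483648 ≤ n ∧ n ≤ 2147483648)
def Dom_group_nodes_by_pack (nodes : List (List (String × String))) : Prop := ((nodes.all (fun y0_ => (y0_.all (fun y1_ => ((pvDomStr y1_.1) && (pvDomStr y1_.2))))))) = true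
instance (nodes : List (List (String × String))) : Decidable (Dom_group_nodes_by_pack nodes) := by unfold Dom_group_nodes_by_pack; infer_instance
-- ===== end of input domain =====

-- B replaces A's dict-of-lists accumulation + per-key re-sort + final item sort by: sort the
-- distinct pack names once, then build each group directly by filter + name-sort (alternative
-- decomposition, similar cost). Equivalence of the RETURN value is proved for all inputs in Pre_.

-- node.get("pack", "uncategorized")
def pvPackOf (node : List (String × String)) : String :=
  (PySem.Dict.mk node).getD "pack" "uncategorized"

-- n["name"]; the default "" is never used under Pre_ (every node carries "name"),
-- where Python's n["name"] would raise KeyError instead.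
def pvNameOf (node : List (String × String)) : String :=
  (PySem.Dict.mk node).getD "name" ""

-- ===== PORT A =====
-- groups.setdefault(pack, []).append(node) is exactly d.modify pack [] (· ++ [node]).
-- The second loop reassigns groups[pack] in place (positions kept), so it is the map over items;
-- dict(sorted(groups.items())) sorts the items — keys are distinct, so the key alone decides.
def group_nodes_by_pack (nodes : List (List (String × String))) :
    List (String × List (List (String × String))) :=
  let groups := nodes.foldl
    (fun g node => g.modify (pvPackOf node) [] (fun v => v ++ [node])) PySem.Dict.empty
  PySem.List.sorted
    (groups.items.map (fun p => (p.1, PySem.List.sorted p.2 pvNameOf false)))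
    (fun p => p.1) false

-- ===== PORT B =====
def group_nodes_by_pack_alt (nodes : List (List (String × String))) :
    List (String × List (List (String × String))) :=
  let packs := PySem.List.sorted (PySem.Set.ofList (nodes.map pvPackOf)) (fun x => x) false
  packs.map (fun p =>
    (p, PySem.List.sorted (nodes.filter (fun n => pvPackOf n == p)) pvNameOf false))

-- ===== PRECONDITION & SPEC =====
-- Pre_ excludes nodes missing the key "name" (Python's A raises KeyError there) and nodes with
-- duplicate keys, which cannot arise from a Python dict (the assoc-list encoding's first-match
-- lookup need not match the dict built from such a pair list, where the last value wins).
def Pre_group_nodes_by_pack (nodes : List (List (String × String))) : Prop :=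
  ∀ node ∈ nodes, "name" ∈ node.map (·.1) ∧ (node.map (·.1)).Nodup
instance (nodes : List (List (String × String))) : Decidable (Pre_group_nodes_by_pack nodes) := by
  unfold Pre_group_nodes_by_pack; infer_instance

def pvWitness_group_nodes_by_pack : (List (List (String × String))) :=
  [[("name", "b"), ("pack", "p")], [("name", "a")]]

def Spec_group_nodes_by_pack (nodes : List (List (String × String))) (out : List (String × List (List (String × String)))) : Prop := out = group_nodes_by_pack_alt nodes
instance (nodes : List (List (String × String))) (out : List (String × List (List (String × String)))) : Decidable (Spec_group_nodes_by_pack nodes out) := by unfold Spec_group_nodes_by_pack; infer_instance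

-- ===== CLAIM (what is proved, stated in full; the proofs are below) =====
def Claim_equal_group_nodes_by_pack : Prop := ∀ (nodes : List (List (String × String))), Dom_group_nodes_by_pack nodes → Pre_group_nodes_by_pack nodes → Spec_group_nodes_by_pack nodes (group_nodes_by_pack nodes)

-- ===== LEMMAS AND PROOFS =====

-- A's grouping dict: keys = the distinct packs in first-occurrence order, value at k = the
-- nodes whose pack is k, in input order.
theorem pv_items_eq (nodes : List (List (String × String))) :
    (nodes.foldl (fun g node => g.modify (pvPackOf node) [] (fun v => v ++ [node]))
        (PySem.Dict.empty : PySem.Dict String (List (List (String × String))))).items =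
      (PySem.Set.ofList (nodes.map pvPackOf)).map
        (fun k => (k, nodes.filter (fun n => pvPackOf n == k))) := by
  set d := nodes.foldl (fun g node => g.modify (pvPackOf node) [] (fun v => v ++ [node]))
      (PySem.Dict.empty : PySem.Dict String (List (List (String × String)))) with hd
  have hkeys : d.keys = PySem.Set.ofList (nodes.map pvPackOf) := by
    rw [hd, PySem.Dict.keys_foldl_modify_key]
    simp [PySem.Dict.keys_empty, PySem.Set.update_nil_left]
  have hnd : d.keys.Nodup := by rw [hkeys]; exact PySem.Set.nodup_ofList _
  have hget : ∀ c, d.getD c [] = nodes.filter (fun n => pvPackOf n == c) := by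
    intro c
    have h := PySem.Dict.getD_foldl_modify_append (l := nodes.map (fun n => (pvPackOf n, n)))
        (d := (PySem.Dict.empty : PySem.Dict String (List (List (String × String))))) (c := c)
    rw [List.foldl_map] at h
    simp only [List.filter_map] at h
    simpa [Function.comp_def, ← hd] using h
  rw [PySem.Dict.items_eq_map_keys d hnd [], hkeys]
  exact List.map_congr_left (fun k _ => by rw [hget k])

-- Sorting key/value pairs with distinct keys by the key = mapping the pair builder over the
-- sorted distinct keys.
theorem pv_sorted_map_fst (xs : List String)
    (g : String → List (List (String × String))) :
    PySem.List.sorted ((PySem.Set.ofList xs).map (fun k => (k, g k))) (fun p => p.1) false =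
      (PySem.List.sorted (PySem.Set.ofList xs) (fun x => x) false).map (fun k => (k, g k)) := by
  apply PySem.List.sorted_eq_of_perm_of_pairwise_lt
  · exact (PySem.List.sorted_perm _ _ _).map _
  · exact (PySem.List.sorted_ofList_pairwise_lt (xs := xs)).map _ (by intro a b h; simpa using h)

-- ===== VERDICT (by name: the statement is the Claim_ definition above) =====
theorem group_nodes_by_pack_spec : Claim_equal_group_nodes_by_pack := by
  intro nodes _ _
  unfold Spec_group_nodes_by_pack group_nodes_by_pack group_nodes_by_pack_alt
  simp only []
  rw [pv_items_eq, List.map_map]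
  exact pv_sorted_map_fst (nodes.map pvPackOf)
      (fun k => PySem.List.sorted (nodes.filter (fun n => pvPackOf n == k)) pvNameOf false)
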